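-- pv_equiv track=rewrite | github.com/Kabiirk/advent-of-code-2025-entries | Day24/Day24Part2.py | part1
-- ===== SOURCE A (Python) =====
-- def part1(tiles_list, direction):
--     blacks = set()
--     for line in tiles_list:
--         i = 0
--         steps = []
--         while i < len(line):
--             if line[i] == 's' or line[i] == 'n':
--                 steps.append(line[i: i+2])
--                 i = i + 2
--             else:
--                 steps.append(line[i])
--                 i = i + 1
--
--         x = 0
--         y = 0
--         for step in steps:
--             x = x + direction[step][0]
--             y = y + direction[step][1]
--         if (x, y) not in blacks:
--             blacks.add((x, y))
--         else:
--             blacks.remove((x, y))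
--
--     # Modified to save memory space
--     return blacks
-- ===== SOURCE B (Python) =====
-- def part1(tiles_list, direction):
--     # walk each line once, collecting its final coordinate
--     coords = []
--     for line in tiles_list:
--         x = 0
--         y = 0
--         i = 0
--         while i < len(line):
--             step = line[i:i + 2] if line[i] in ('s', 'n') else line[i]
--             i += len(step)
--             x += direction[step][0]
--             y += direction[step][1]
--         coords.append((x, y))
--     # a tile ends up black iff its coordinate was visited an odd number of times
--     counts = {}
--     for c in coords:
--         counts[c] = counts.get(c, 0) + 1
--     return {c for c, n in counts.items() if n % 2 == 1}
-- ===== Notes on version B (the rewrite author's own statement) =====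
-- stated objective: alternative
-- what changed: B replaces A's maintain-and-toggle set (membership test then add/remove per line) by collect-then-select: it walks each line once accumulating the coordinate directly (no intermediate steps list), collects all final coordinates, counts them with a dictionary, and returns the set of coordinates with an odd count.
import Mathlib
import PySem

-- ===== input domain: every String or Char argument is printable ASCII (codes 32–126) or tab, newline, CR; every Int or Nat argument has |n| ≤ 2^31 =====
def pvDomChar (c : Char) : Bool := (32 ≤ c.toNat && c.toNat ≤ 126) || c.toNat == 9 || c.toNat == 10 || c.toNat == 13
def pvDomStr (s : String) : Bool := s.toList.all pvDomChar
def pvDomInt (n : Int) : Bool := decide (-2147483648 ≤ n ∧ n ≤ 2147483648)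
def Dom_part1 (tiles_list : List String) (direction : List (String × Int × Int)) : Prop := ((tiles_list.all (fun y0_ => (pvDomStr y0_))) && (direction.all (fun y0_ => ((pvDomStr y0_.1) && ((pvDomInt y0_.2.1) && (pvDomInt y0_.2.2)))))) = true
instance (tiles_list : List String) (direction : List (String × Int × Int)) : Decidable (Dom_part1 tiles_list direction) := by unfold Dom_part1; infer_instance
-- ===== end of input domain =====

-- B replaces A's maintain-and-toggle set by collect-then-select: walk each line once to its
-- final coordinate, count all coordinates in a dictionary, return those with an odd count
-- (alternative decomposition, same cost).  Both programs return a Python set.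

-- ===== PORT A =====
-- the inner while-loop of A: split a line into hex-direction tokens (the `steps` list)
def pvTok : List Char → List String
  | [] => []
  | c :: rest =>
    if c = 's' ∨ c = 'n' then
      match rest with
      | d :: rest' => String.ofList [c, d] :: pvTok rest'
      | [] => [String.ofList [c]]
    else String.ofList [c] :: pvTok rest

-- x = x + direction[step][0]; y = y + direction[step][1]  (total via getD; Pre_part1 guarantees the key is present)
def pvStep (direction : List (String × Int × Int)) (p : Int × Int) (t : String) : Int × Int :=
  let d := PySem.Dict.getD (PySem.Dict.mk direction) t (0, 0)
  (p.1 + d.1, p.2 + d.2)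

def part1 (tiles_list : List String) (direction : List (String × Int × Int)) : List (Int × Int) :=
  tiles_list.foldl (fun blacks line =>
    let steps := pvTok line.toList
    let c := steps.foldl (pvStep direction) (0, 0)
    if !PySem.Set.contains blacks c then PySem.Set.add blacks c
    else (PySem.Set.remove? blacks c).getD blacks) PySem.Set.empty

-- ===== PORT B =====
-- B's inner while-loop: walk the line once, accumulating (x, y) directly (no steps list)
def pvWalk (direction : List (String × Int × Int)) : List Char → Int × Int → Int × Int
  | [], p => p
  | c :: rest, p =>
    if c = 's' ∨ c = 'n' then
      match rest with
      | d :: rest' => pvWalk direction rest' (pvStep direction p (String.ofList [c, d]))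
      | [] => pvStep direction p (String.ofList [c])
    else pvWalk direction rest (pvStep direction p (String.ofList [c]))

def part1_alt (tiles_list : List String) (direction : List (String × Int × Int)) : List (Int × Int) :=
  let coords := tiles_list.map (fun line => pvWalk direction line.toList (0, 0))
  let cnt := coords.foldl (fun d c => d.insert c (d.getD c 0 + 1)) PySem.Dict.empty
  -- the set {c for c, n in counts.items() if n % 2 == 1}: Python's iteration order over a set is
  -- not modelled, so the set is represented by its distinct elements in last-visit order
  coords.dedup.filter (fun c => PySem.Int.mod (cnt.getD c 0) 2 == 1)

-- ===== PRECONDITION & SPEC =====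
-- Pre_ excludes exactly the inputs on which A raises KeyError: some line contains a hex token that is
-- not a key of direction.  Naming those tokens needs the tokenisation pvTok of each line (a structural
-- one-pass split of the string); Pre_ does not re-run either program's toggle/count logic.  The proved
-- equivalence of the two (total, getD-based) ports does not otherwise depend on Pre_.
def Pre_part1 (tiles_list : List String) (direction : List (String × Int × Int)) : Prop :=
  (tiles_list.all (fun line =>
    (pvTok line.toList).all (fun t => PySem.Dict.contains (PySem.Dict.mk direction) t))) = true
instance (tiles_list : List String) (direction : List (String × Int × Int)) : Decidable (Pre_part1 tiles_list direction) := by unfold Pre_part1; infer_instance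

def pvWitness_part1 : List String × (List (String × Int × Int)) :=
  (["ee", "w", "nww"], [("e", 1, 0), ("w", -1, 0), ("nw", 0, -1)])

def Spec_part1 (tiles_list : List String) (direction : List (String × Int × Int)) (out : List (Int × Int)) : Prop := out = part1_alt tiles_list direction
instance (tiles_list : List String) (direction : List (String × Int × Int)) (out : List (Int × Int)) : Decidable (Spec_part1 tiles_list direction out) := by unfold Spec_part1; infer_instance

-- ===== CLAIM (what is proved, stated in full; the proofs are below) =====
def Claim_equal_part1 : Prop := ∀ (tiles_list : List String) (direction : List (String × Int × Int)), Dom_part1 tiles_list direction → Pre_part1 tiles_list direction → Spec_part1 tiles_list direction (part1 tiles_list direction)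

-- ===== LEMMAS AND PROOFS =====

-- A's toggle step, with the Set primitives resolved (remove = filter out, add = append)
def pvToggle (s : List (Int × Int)) (c : Int × Int) : List (Int × Int) :=
  if c ∈ s then s.filter (fun e => !(e == c)) else s ++ [c]

-- keep the first occurrence of each element not already in `seen`
def pvDedup (seen : List (Int × Int)) : List (Int × Int) → List (Int × Int)
  | [] => []
  | c :: l => if c ∈ seen then pvDedup seen l else c :: pvDedup (seen ++ [c]) l

-- the parity predicate of B, as a function of the full coordinate list
def pvOdd (cs : List (Int × Int)) (c : Int × Int) : Bool :=
  PySem.Int.mod ((cs.count c : Int)) 2 == 1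

-- B's direct walk computes the same coordinate as A's tokenise-then-sum
theorem pvWalk_eq (direction : List (String × Int × Int)) (l : List Char) (p : Int × Int) :
    pvWalk direction l p = (pvTok l).foldl (pvStep direction) p := by
  induction l using pvTok.induct generalizing p with
  | case1 => rfl
  | case2 c h d rest' ih =>
    simp only [pvWalk, pvTok, h, if_pos, List.foldl_cons]
    exact ih _
  | case3 c h =>
    simp [pvWalk, pvTok, h]
  | case4 c rest h ih =>
    cases rest with
    | nil => simp [pvWalk, pvTok, h]
    | cons d r =>
      simp only [pvWalk, pvTok, if_neg h, List.foldl_cons]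
      exact ih _

theorem pvToggle_eq (s : List (Int × Int)) (c : Int × Int) :
    (if !PySem.Set.contains s c then PySem.Set.add s c
     else (PySem.Set.remove? s c).getD s) = pvToggle s c := by
  by_cases h : c ∈ s
  · have hc : PySem.Set.contains s c = true := (PySem.Set.contains_iff s c).mpr h
    simp [pvToggle, h, PySem.Set.remove?_of_mem h, PySem.Set.discard]
  · have hc : PySem.Set.contains s c = false := by
      rw [← Bool.not_eq_true]
      simp [h]
    simp [pvToggle, h]

theorem pvDedup_filter (l : List (Int × Int)) (s : List (Int × Int)) :
    pvDedup s l = (pvDedup [] l).filter (fun e => decide (e ∉ s)) := by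
  induction l generalizing s with
  | nil => simp [pvDedup]
  | cons c l ih =>
    simp only [pvDedup, List.not_mem_nil, if_false, List.nil_append]
    by_cases h : c ∈ s
    · rw [if_pos h, List.filter_cons]
      have hcs : decide (c ∉ s) = false := by simp [h]
      rw [hcs]
      simp only [Bool.false_eq_true, if_neg (by simp : ¬False)]
      rw [ih s, ih [c], List.filter_filter]
      congr 1
      funext a
      by_cases ha : a = c
      · subst ha; simp [h]
      · simp [ha]
    · rw [if_neg h, List.filter_cons]
      have hcs : decide (c ∉ s) = true := by simp [h]
      rw [hcs, if_pos rfl]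
      congr 1
      rw [ih (s ++ [c]), ih [c], List.filter_filter]
      congr 1
      funext a
      by_cases h1 : a ∈ s <;> by_cases h2 : a = c <;> simp [h1, h2, List.mem_append]

theorem mem_pvDedup (l : List (Int × Int)) (s : List (Int × Int)) (x : Int × Int) :
    x ∈ pvDedup s l ↔ x ∈ l ∧ x ∉ s := by
  induction l generalizing s with
  | nil => simp [pvDedup]
  | cons c l ih =>
    simp only [pvDedup]
    by_cases h : c ∈ s
    · rw [if_pos h, ih s]
      constructor
      · rintro ⟨hl, hs⟩; exact ⟨List.mem_cons_of_mem _ hl, hs⟩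
      · rintro ⟨hl, hs⟩
        rcases List.mem_cons.mp hl with rfl | hl
        · exact absurd h hs
        · exact ⟨hl, hs⟩
    · rw [if_neg h]
      simp only [List.mem_cons, ih (s ++ [c]), List.mem_append]
      constructor
      · rintro (rfl | ⟨hl, hs⟩)
        · exact ⟨Or.inl rfl, h⟩
        · exact ⟨Or.inr hl, fun hx => hs (Or.inl hx)⟩
      · rintro ⟨rfl | hl, hs⟩
        · exact Or.inl rfl
        · by_cases hxc : x = c
          · exact Or.inl hxc
          · exact Or.inr ⟨hl, by simp [hs, hxc]⟩

theorem pvNotMemSingleton (c : Int × Int) :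
    (fun e => decide (e ∉ ([c] : List (Int × Int)))) = fun e => !(e == c) := by
  funext e
  by_cases h : e = c <;> simp [h]

-- Mathlib's List.dedup (last occurrences, in order) of l ++ [c]
theorem pvDedupAppendSingleton (m : List (Int × Int)) (c : Int × Int) :
    (m ++ [c]).dedup = m.dedup.filter (fun e => !(e == c)) ++ [c] := by
  induction m with
  | nil => simp
  | cons x m ih =>
    rw [List.cons_append]
    by_cases hx : x ∈ m ++ [c]
    · rw [List.dedup_cons_of_mem hx, ih]
      by_cases hxc : x = c
      · subst hxc
        by_cases hxm : x ∈ m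
        · rw [List.dedup_cons_of_mem hxm]
        · rw [List.dedup_cons_of_notMem hxm, List.filter_cons]
          simp
      · have hxm : x ∈ m := by
          rcases List.mem_append.mp hx with h | h
          · exact h
          · simp at h; exact absurd h hxc
        rw [List.dedup_cons_of_mem hxm]
    · have hxm : x ∉ m := fun h => hx (List.mem_append.mpr (Or.inl h))
      have hxc : x ≠ c := fun h => hx (by simp [h])
      rw [List.dedup_cons_of_notMem hx, List.dedup_cons_of_notMem hxm, ih,
        List.filter_cons]
      simp [hxc]

-- first-occurrence dedup of the reversed list, reversed back = Mathlib dedup (last occurrences)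
theorem pvDedup_reverse (l : List (Int × Int)) :
    (pvDedup [] l).reverse = l.reverse.dedup := by
  induction l with
  | nil => simp [pvDedup]
  | cons c l ih =>
    simp only [pvDedup, List.not_mem_nil, if_false, List.nil_append, List.reverse_cons]
    rw [pvDedup_filter l [c], pvNotMemSingleton, ← List.filter_reverse,
      ih, pvDedupAppendSingleton]

theorem pvOdd_append (cs : List (Int × Int)) (c e : Int × Int) (h : e ≠ c) :
    pvOdd (cs ++ [c]) e = pvOdd cs e := by
  unfold pvOdd
  rw [List.count_append]
  simp [Ne.symm h]

theorem pvOdd_append_self (cs : List (Int × Int)) (c : Int × Int) :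
    pvOdd (cs ++ [c]) c = !pvOdd cs c := by
  unfold pvOdd
  rw [List.count_append, show List.count c [c] = 1 from by simp]
  set n := cs.count c with hn
  push_cast
  have h : ∀ m : Int, 0 ≤ m → PySem.Int.mod m 2 = m % 2 := by
    intro m hm; simp [PySem.Int.mod, Int.fmod_eq_emod]
  rw [h _ (by positivity), h _ (by positivity)]
  rcases Nat.even_or_odd n with he | ho
  · obtain ⟨k, hk⟩ := he
    rw [hk]; push_cast
    rw [show ((k:Int)+k+1)%2 = 1 by omega, show ((k:Int)+k)%2 = 0 by omega]
    decide
  · obtain ⟨k, hk⟩ := ho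
    rw [hk]; push_cast
    rw [show ((2:Int)*k+1+1)%2 = 0 by omega, show ((2:Int)*k+1)%2 = 1 by omega]
    decide

theorem pvOdd_mem (cs : List (Int × Int)) (c : Int × Int) (h : pvOdd cs c = true) :
    c ∈ cs := by
  by_contra hc
  have h0 : cs.count c = 0 := List.count_eq_zero.mpr hc
  rw [pvOdd, h0] at h
  simp [PySem.Int.mod] at h

-- A's toggle fold, characterised: the odd-count coordinates in last-occurrence order
theorem pvMain (cs : List (Int × Int)) :
    cs.foldl pvToggle [] = ((pvDedup [] cs.reverse).filter (pvOdd cs)).reverse := by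
  induction cs using List.reverseRecOn with
  | nil => simp [pvDedup]
  | append_singleton cs c ih =>
    rw [List.foldl_append, List.foldl_cons, List.foldl_nil, ih]
    rw [List.reverse_append, List.reverse_singleton, List.singleton_append]
    have hd : pvDedup [] (c :: cs.reverse)
        = c :: (pvDedup [] cs.reverse).filter (fun e => !(e == c)) := by
      simp only [pvDedup, List.not_mem_nil, if_false, List.nil_append]
      rw [pvDedup_filter cs.reverse [c], pvNotMemSingleton]
    rw [hd, List.filter_cons]
    set D0 := pvDedup [] cs.reverse with hD0
    set G := (D0.filter (pvOdd cs)).reverse with hG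
    have hX : (D0.filter (fun e => !(e == c))).filter (pvOdd (cs ++ [c]))
        = (D0.filter (pvOdd cs)).filter (fun e => !(e == c)) := by
      have h1 : (D0.filter (fun e => !(e == c))).filter (pvOdd (cs ++ [c]))
          = (D0.filter (fun e => !(e == c))).filter (pvOdd cs) := by
        refine List.filter_congr ?_
        intro a ha
        have hne : a ≠ c := by
          have := List.of_mem_filter ha
          simpa using this
        exact pvOdd_append cs c a hne
      rw [h1, List.filter_comm]
    have hmemG : c ∈ G ↔ pvOdd cs c = true := by
      rw [hG, List.mem_reverse, List.mem_filter]
      constructor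
      · exact fun h => h.2
      · intro h
        refine ⟨?_, h⟩
        rw [hD0, mem_pvDedup, List.mem_reverse]
        exact ⟨pvOdd_mem cs c h, List.not_mem_nil⟩
    by_cases hp : pvOdd cs c = true
    · rw [pvOdd_append_self, hp]
      simp only [Bool.not_true, Bool.false_eq_true, if_false]
      rw [hX, ← List.filter_reverse, ← hG]
      rw [pvToggle, if_pos (hmemG.mpr hp)]
    · rw [Bool.not_eq_true] at hp
      have hcG : c ∉ G := fun h => by rw [hmemG] at h; simp [hp] at h
      have hfG : G.filter (fun e => !(e == c)) = G := by
        refine List.filter_eq_self.mpr ?_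
        intro a ha
        have : a ≠ c := fun h => hcG (h ▸ ha)
        simp [this]
      rw [pvOdd_append_self, hp]
      simp only [Bool.not_false, if_true]
      rw [List.reverse_cons, hX, ← List.filter_reverse, ← hG, hfG]
      rw [pvToggle, if_neg hcG]

-- ===== VERDICT (by name: the statement is the Claim_ definition above) =====
theorem part1_spec : Claim_equal_part1 := by
  intro tiles_list direction _ _
  unfold Spec_part1 part1 part1_alt
  have hbody : (fun (blacks : PySem.Set (Int × Int)) (line : String) =>
      let steps := pvTok line.toList
      let c := steps.foldl (pvStep direction) ((0 : Int), (0 : Int))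
      if !PySem.Set.contains blacks c then PySem.Set.add blacks c
      else (PySem.Set.remove? blacks c).getD blacks)
      = fun blacks line =>
        pvToggle blacks ((pvTok line.toList).foldl (pvStep direction) ((0 : Int), (0 : Int))) := by
    funext blacks line
    exact pvToggle_eq blacks _
  rw [hbody]
  have hfm : ∀ (l : List String) (f : String → Int × Int),
      List.foldl (fun x y => pvToggle x (f y)) ([] : List (Int × Int)) l
        = List.foldl pvToggle [] (l.map f) := by
    intro l f
    exact (List.foldl_map).symm
  rw [show (PySem.Set.empty : PySem.Set (Int × Int)) = [] from rfl]
  rw [hfm tiles_list (fun line => (pvTok line.toList).foldl (pvStep direction) ((0 : Int), (0 : Int)))]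
  have hw : (fun line => pvWalk direction line.toList ((0 : Int), (0 : Int)))
      = fun (line : String) => (pvTok line.toList).foldl (pvStep direction) ((0 : Int), (0 : Int)) := by
    funext line
    exact pvWalk_eq direction line.toList _
  rw [hw]
  set cs := tiles_list.map (fun line => (pvTok line.toList).foldl (pvStep direction) ((0 : Int), (0 : Int))) with hcs
  simp only [PySem.Dict.getD_foldl_insert_add_one, PySem.Dict.getD_empty, zero_add]
  rw [pvMain cs, ← List.filter_reverse, pvDedup_reverse, List.reverse_reverse]
  rfl
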